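-- pv_equiv track=rewrite | github.com/abdelneuhaus/EpidemiOptim | local_test_to_remove_when_finished/oldData/oneClassModel/utils.py | get_inital_state
-- ===== SOURCE A (Python) =====
-- def get_inital_state(start, end):
--     a = range(start,end+1)
--     tmp = []
--     otp = []
--     for i in a :
--         tmp.append(i)
--
--     res = []
--     for i in tmp:
--         otp.append(i)
--         if (i%4 == 0):
--             res.append(otp)
--             otp = []
--     return res
-- ===== SOURCE B (Python) =====
-- def get_inital_state(start, end):
--     # Closed-form chunking: each chunk ends at a multiple of 4, so iterate over
--     # the multiples of 4 in [start, end] and build each chunk directly.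
--     res = []
--     m = ((start + 3) // 4) * 4  # smallest multiple of 4 >= start
--     while m <= end:
--         res.append(list(range(max(start, m - 3), m + 1)))
--         m += 4
--     return res
-- ===== Notes on version B (the rewrite author's own statement) =====
-- stated objective: alternative
-- what changed: Instead of scanning every integer and flushing an accumulator at multiples of 4, B computes the chunk boundaries in closed form (the multiples of 4 in [start, end]) and materializes each chunk directly with range(), which also drops the trailing incomplete chunk with no extra state.
import Mathlib
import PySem

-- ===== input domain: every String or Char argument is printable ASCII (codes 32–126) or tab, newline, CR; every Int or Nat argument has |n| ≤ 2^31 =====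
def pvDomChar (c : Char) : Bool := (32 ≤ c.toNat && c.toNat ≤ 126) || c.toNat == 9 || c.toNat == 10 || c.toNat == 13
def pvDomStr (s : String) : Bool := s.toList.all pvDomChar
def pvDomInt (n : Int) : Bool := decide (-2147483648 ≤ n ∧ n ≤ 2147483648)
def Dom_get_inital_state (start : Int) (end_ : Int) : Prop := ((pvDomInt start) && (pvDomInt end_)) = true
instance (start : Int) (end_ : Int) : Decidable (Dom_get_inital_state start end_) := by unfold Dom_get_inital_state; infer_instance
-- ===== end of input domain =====

-- B computes the chunk boundaries (multiples of 4 in [start, end]) in closed form and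
-- builds each chunk directly, instead of A's element-by-element scan with a flushed accumulator.

-- ===== PORT A =====
-- one step of A's second for-loop: state is (otp, res)
def pvStepA (st : List Int × List (List Int)) (i : Int) : List Int × List (List Int) :=
  let otp := st.1 ++ [i]
  if PySem.Int.mod i 4 = 0 then ([], st.2 ++ [otp]) else (otp, st.2)

def get_inital_state (start : Int) (end_ : Int) : List (List Int) :=
  let tmp := PySem.List.pyRange start (end_ + 1) 1   -- first loop just copies range into tmp
  ((tmp.foldl pvStepA ([], [])).2)

-- ===== PORT B =====
-- first = ((start + 3) // 4) * 4, the smallest multiple of 4 >= start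
def pvCeil4 (a : Int) : Int := PySem.Int.floordiv (a + 3) 4 * 4

-- while m <= end: append list(range(max(start, m-3), m+1)); m += 4
def pvAltGo (start end_ m : Int) : List (List Int) :=
  if m ≤ end_ then
    PySem.List.pyRange (max start (m - 3)) (m + 1) 1 :: pvAltGo start end_ (m + 4)
  else []
termination_by (end_ + 1 - m).toNat
decreasing_by omega

def get_inital_state_alt (start : Int) (end_ : Int) : List (List Int) :=
  pvAltGo start end_ (pvCeil4 start)

-- ===== PRECONDITION & SPEC =====
def Spec_get_inital_state (start : Int) (end_ : Int) (out : List (List Int)) : Prop := out = get_inital_state_alt start end_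
instance (start : Int) (end_ : Int) (out : List (List Int)) : Decidable (Spec_get_inital_state start end_ out) := by unfold Spec_get_inital_state; infer_instance

-- ===== CLAIM (what is proved, stated in full; the proofs are below) =====
def Claim_equal_get_inital_state : Prop := ∀ (start : Int) (end_ : Int), Dom_get_inital_state start end_ → Spec_get_inital_state start end_ (get_inital_state start end_)

-- ===== LEMMAS AND PROOFS =====

theorem pvCeil4_spec (a : Int) : a ≤ pvCeil4 a ∧ pvCeil4 a ≤ a + 3 ∧ 4 ∣ pvCeil4 a ∧
    ∀ k : Int, 4 ∣ k → a ≤ k → pvCeil4 a ≤ k := by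
  unfold pvCeil4
  rw [PySem.Int.floordiv_eq_ediv_of_pos (by norm_num)]
  have h := Int.mul_ediv_add_emod (a + 3) 4
  have h1 := Int.emod_nonneg (a + 3) (by norm_num : (4:Int) ≠ 0)
  have h2 := Int.emod_lt_of_pos (a + 3) (by norm_num : (0:Int) < 4)
  refine ⟨by omega, by omega, ⟨(a + 3) / 4, by omega⟩, ?_⟩
  rintro k ⟨t, rfl⟩ hk; omega

-- folding A's step over a stretch containing no multiple of 4 only extends otp
theorem pvFold_no_mult (a b : Int) (otp : List Int) (res : List (List Int))
    (hnm : ∀ i : Int, a ≤ i → i < b → ¬ (4 ∣ i)) :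
    (PySem.List.pyRange a b 1).foldl pvStepA (otp, res) = (otp ++ PySem.List.pyRange a b 1, res) := by
  by_cases hab : a < b
  · rw [PySem.List.pyRange_one_cons hab, List.foldl_cons]
    have ha : ¬ (4:Int) ∣ a := hnm a le_rfl hab
    have hstep : pvStepA (otp, res) a = (otp ++ [a], res) := by
      simp [pvStepA, ha]
    rw [hstep, pvFold_no_mult (a + 1) b (otp ++ [a]) res (fun i h1 h2 => hnm i (by omega) h2)]
    simp
  · have hnil : PySem.List.pyRange a b 1 = [] := by
      rw [PySem.List.pyRange_one]
      have : (b - a).toNat = 0 := by omega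
      simp [this]
    simp [hnil]
termination_by (b - a).toNat
decreasing_by omega

-- folding A's step over [a, m] where m is the first multiple of 4 ≥ a flushes exactly one chunk
theorem pvFold_chunk (a m : Int) (otp : List Int) (res : List (List Int))
    (ham : a ≤ m) (hm : 4 ∣ m) (hnm : ∀ i : Int, a ≤ i → i < m → ¬ (4 ∣ i)) :
    (PySem.List.pyRange a (m + 1) 1).foldl pvStepA (otp, res)
      = ([], res ++ [otp ++ PySem.List.pyRange a (m + 1) 1]) := by
  have hsplit : PySem.List.pyRange a (m + 1) 1
      = PySem.List.pyRange a m 1 ++ PySem.List.pyRange m (m + 1) 1 :=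
    PySem.List.pyRange_one_append a m (m + 1) (by omega) (by omega)
  rw [hsplit, List.foldl_append, pvFold_no_mult a m otp res hnm]
  have hlast : PySem.List.pyRange m (m + 1) 1 = [m] := by
    rw [PySem.List.pyRange_one_cons (by omega)]
    have hnil : PySem.List.pyRange (m + 1) (m + 1) 1 = [] := by
      rw [PySem.List.pyRange_one]; simp
    rw [hnil]
  rw [hlast]
  simp [pvStepA, hm]

-- once both start parameters lie at or below m-3, they are irrelevant to pvAltGo
theorem pvAltGo_congr (s₁ s₂ e m : Int) (h₁ : s₁ ≤ m - 3) (h₂ : s₂ ≤ m - 3) :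
    pvAltGo s₁ e m = pvAltGo s₂ e m := by
  unfold pvAltGo
  by_cases hm : m ≤ e
  · simp only [hm, if_true]
    rw [max_eq_right (by omega), max_eq_right (by omega),
      pvAltGo_congr s₁ s₂ e (m + 4) (by omega) (by omega)]
  · simp [hm]
termination_by (e + 1 - m).toNat
decreasing_by omega

-- main invariant: A's fold from ([], res) appends exactly B's chunk list
theorem pvMain (a e : Int) (res : List (List Int)) :
    ((PySem.List.pyRange a (e + 1) 1).foldl pvStepA ([], res)).2
      = res ++ pvAltGo a e (pvCeil4 a) := by
  obtain ⟨hle, hle3, hdvd, hmin⟩ := pvCeil4_spec a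
  set m := pvCeil4 a with hm
  by_cases hme : m ≤ e
  · -- split the range at the first multiple m = pvCeil4 a
    have hsplit : PySem.List.pyRange a (e + 1) 1
        = PySem.List.pyRange a (m + 1) 1 ++ PySem.List.pyRange (m + 1) (e + 1) 1 :=
      PySem.List.pyRange_one_append a (m + 1) (e + 1) (by omega) (by omega)
    have hnm : ∀ i : Int, a ≤ i → i < m → ¬ (4 ∣ i) := by
      intro i h1 h2 hdvd'; exact absurd (hmin i hdvd' h1) (by omega)
    rw [hsplit, List.foldl_append, pvFold_chunk a m [] res hle hdvd hnm]
    rw [pvMain (m + 1) e (res ++ [[] ++ PySem.List.pyRange a (m + 1) 1])]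
    have hceil : pvCeil4 (m + 1) = m + 4 := by
      obtain ⟨hle', _, hdvd', hmin'⟩ := pvCeil4_spec (m + 1)
      obtain ⟨u, hu⟩ := hdvd
      have h1 : pvCeil4 (m + 1) ≤ m + 4 := hmin' (m + 4) ⟨u + 1, by omega⟩ (by omega)
      obtain ⟨t, ht⟩ := hdvd'
      omega
    have hunf : pvAltGo a e m = PySem.List.pyRange a (m + 1) 1 :: pvAltGo (m + 1) e (m + 4) := by
      rw [pvAltGo, if_pos hme, max_eq_left (by omega),
        pvAltGo_congr a (m + 1) e (m + 4) (by omega) (by omega)]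
    rw [hceil, hunf]
    simp
  · -- no multiple of 4 in the range: A flushes nothing, B's loop never runs
    have hnm : ∀ i : Int, a ≤ i → i < e + 1 → ¬ (4 ∣ i) := by
      intro i h1 h2 hdvd'; exact absurd (hmin i hdvd' h1) (by omega)
    rw [pvFold_no_mult a (e + 1) [] res hnm]
    rw [pvAltGo, if_neg hme]
    simp
termination_by (e + 1 - a).toNat
decreasing_by omega

-- ===== VERDICT (by name: the statement is the Claim_ definition above) =====
theorem get_inital_state_spec : Claim_equal_get_inital_state := by
  intro start end_ _
  unfold Spec_get_inital_state get_inital_state get_inital_state_alt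
  simpa using pvMain start end_ []
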